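-- pv_equiv track=rewrite | github.com/Emerich-Renan/MyPythonJourney | intermediarios_exercicios/exercicio4b.py | encontrar_repetido_3x
-- ===== SOURCE A (Python) =====
-- def encontrar_repetido_3x(lista_inteiros):
--
--     numeros_checados = {}
--     numero_repetido_3x = -1
--
--     for numero in lista_inteiros:
--         if numero in numeros_checados:
--             numeros_checados[numero] += 1
--             if numeros_checados[numero] == 3:
--                 numero_repetido_3x = numero
--                 break
--         else:
--             numeros_checados[numero] = 1
--
--     return numero_repetido_3x
-- ===== SOURCE B (Python) =====
-- def encontrar_repetido_3x(lista_inteiros):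
--     # Value-major strategy: for each distinct value, collect all its occurrence
--     # positions once, then take the value whose THIRD occurrence comes earliest.
--     melhor = None
--     for numero in dict.fromkeys(lista_inteiros):
--         posicoes = [i for i, x in enumerate(lista_inteiros) if x == numero]
--         if len(posicoes) >= 3 and (melhor is None or posicoes[2] < melhor[0]):
--             melhor = (posicoes[2], numero)
--     return -1 if melhor is None else melhor[1]
-- ===== Notes on version B (the rewrite author's own statement) =====
-- stated objective: alternative
-- what changed: Replaces A's element-major single pass with a running count dictionary by a value-major computation: for each distinct value it builds the full list of occurrence positions once and returns the value whose third occurrence has the smallest index (argmin over values).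
import Mathlib
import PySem

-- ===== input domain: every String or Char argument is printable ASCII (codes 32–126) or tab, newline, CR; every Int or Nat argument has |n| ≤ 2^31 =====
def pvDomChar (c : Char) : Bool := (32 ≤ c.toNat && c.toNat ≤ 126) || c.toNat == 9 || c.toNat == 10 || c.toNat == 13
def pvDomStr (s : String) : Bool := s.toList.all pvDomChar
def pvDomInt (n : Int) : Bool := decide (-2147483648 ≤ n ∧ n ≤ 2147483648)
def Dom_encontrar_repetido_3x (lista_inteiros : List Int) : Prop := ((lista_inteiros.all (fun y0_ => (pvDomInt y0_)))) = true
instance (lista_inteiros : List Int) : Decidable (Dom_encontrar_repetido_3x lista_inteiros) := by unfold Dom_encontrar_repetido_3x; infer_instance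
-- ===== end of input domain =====

-- B is value-major instead of element-major: for each distinct value it collects the value's
-- occurrence positions once and returns the value whose third occurrence comes first (argmin);
-- same results as A's running-count single pass, no speed claim.

-- ===== PORT A =====
-- the for-loop of A: dict of counts, result accumulator, remaining items; 'break' = early return of the set result
def encALoop (d : PySem.Dict Int Int) (res : Int) : List Int → Int
  | [] => res
  | n :: rest =>
    if d.contains n then
      let c := d.getD n 0 + 1          -- numeros_checados[numero] += 1
      let d' := d.insert n c
      if c == 3 then n                  -- numero_repetido_3x = numero; break
      else encALoop d' res rest
    else
      encALoop (d.insert n 1) res rest  -- numeros_checados[numero] = 1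

def encontrar_repetido_3x (lista_inteiros : List Int) : Int :=
  encALoop PySem.Dict.empty (-1) lista_inteiros

-- ===== PORT B =====
-- posicoes = [i for i, x in enumerate(lista_inteiros) if x == numero]
def posOcorrencias (lista : List Int) (numero : Int) : List Int :=
  ((PySem.List.enumerate lista 0).filter (fun p => p.2 == numero)).map (fun p => p.1)

-- one iteration of B's for-loop: keep the (third-occurrence index, value) pair with minimal index
def encBStep (lista : List Int) (melhor : Option (Int × Int)) (numero : Int) : Option (Int × Int) :=
  let pos := posOcorrencias lista numero
  if 3 ≤ pos.length then
    match melhor with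
    | none => some (pos.getD 2 0, numero)
    | some m => if pos.getD 2 0 < m.1 then some (pos.getD 2 0, numero) else melhor
  else melhor

def encontrar_repetido_3x_alt (lista_inteiros : List Int) : Int :=
  match (PySem.List.dedup lista_inteiros).foldl (encBStep lista_inteiros) none with
  | none => -1
  | some m => m.2

-- ===== PRECONDITION & SPEC =====
def Spec_encontrar_repetido_3x (lista_inteiros : List Int) (out : Int) : Prop := out = encontrar_repetido_3x_alt lista_inteiros
instance (lista_inteiros : List Int) (out : Int) : Decidable (Spec_encontrar_repetido_3x lista_inteiros out) := by unfold Spec_encontrar_repetido_3x; infer_instance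

-- ===== CLAIM (what is proved, stated in full; the proofs are below) =====
def Claim_equal_encontrar_repetido_3x : Prop := ∀ (lista_inteiros : List Int), Dom_encontrar_repetido_3x lista_inteiros → Spec_encontrar_repetido_3x lista_inteiros (encontrar_repetido_3x lista_inteiros)

-- ===== LEMMAS AND PROOFS =====

-- index i is a 'hit': the prefix up to i contains the element at i exactly 3 times
def condT (l : List Int) (i : Nat) : Bool := (l.take (i+1)).count (l.getD i 0) == 3

-- all hits, in increasing order
def Cset (l : List Int) : List Nat := (List.range l.length).filter (condT l)

-- occurrence positions of v, as Nats
def Pfin (l : List Int) (v : Int) : List Nat :=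
  (List.range l.length).filter (fun i => l.getD i 0 == v)

-- A's scan, re-expressed over the index list
def scanC (l : List Int) : List Nat → Int
  | [] => -1
  | i :: is => if condT l i then l.getD i 0 else scanC l is

lemma scanC_eq_filter (l : List Int) (is : List Nat) :
    scanC l is = match is.filter (condT l) with
      | [] => -1
      | i :: _ => l.getD i 0 := by
  induction is with
  | nil => simp [scanC]
  | cons i is ih =>
    by_cases h : condT l i
    · simp [scanC, h]
    · simp [scanC, h, ih]

lemma count_take_eq (l : List Int) (v : Int) :
    ∀ m, m ≤ l.length →
      (l.take m).count v = ((List.range m).filter (fun i => l.getD i 0 == v)).length := by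
  intro m
  induction m with
  | zero => simp
  | succ m ih =>
    intro hm
    have hm' : m < l.length := by omega
    have hget : l[m]? = some l[m] := List.getElem?_eq_getElem hm'
    rw [List.take_add_one, hget, List.range_succ, List.filter_append, List.count_append,
      ih (by omega)]
    by_cases h : l[m] = v
    · simp [List.getD, hget, h]
    · simp [List.getD, hget, h]

lemma encALoop_eq (l : List Int) : ∀ (rest p : List Int) (d : PySem.Dict Int Int),
    l = p ++ rest →
    (∀ x, d.getD x 0 = p.count x) →
    (∀ x, d.contains x = decide (x ∈ p)) →
    (∀ x, p.count x ≤ 2) →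
    encALoop d (-1) rest = scanC l (List.range' p.length rest.length) := by
  intro rest
  induction rest with
  | nil => intro p d _ _ _ _; simp [encALoop, scanC]
  | cons n rest' ih =>
    intro p d hl hgetD hcont hle
    subst hl
    have hlen : p.length < (p ++ n :: rest').length := by simp
    have hgdl : (p ++ n :: rest').getD p.length 0 = n := by
      rw [List.getD_eq_getElem _ 0 hlen, List.getElem_append_right (Nat.le_refl _)]
      simp
    have htake : (p ++ n :: rest').take (p.length + 1) = p ++ [n] := by
      rw [List.take_append]
      simp
    have hcond : condT (p ++ n :: rest') p.length = ((p.count n + 1 : Nat) == 3) := by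
      unfold condT
      rw [htake, hgdl, List.count_append]
      simp
    rw [List.length_cons, List.range'_succ]
    by_cases hmem : n ∈ p
    · have hc : d.contains n = true := by rw [hcont]; simp [hmem]
      simp only [encALoop, hc, if_true, hgetD]
      by_cases h3 : p.count n + 1 = 3
      · have hbA : ((p.count n : Int) + 1 == 3) = true := by simp; omega
        have : condT (p ++ n :: rest') p.length = true := by rw [hcond]; simp [h3]
        simp [hbA, scanC, this]
      · have hbA : ((p.count n : Int) + 1 == 3) = false := by simp; omega
        have hcf : condT (p ++ n :: rest') p.length = false := by rw [hcond]; simp; omega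
        simp only [hbA, Bool.false_eq_true, if_false, scanC, hcf]
        have := ih (p ++ [n]) (d.insert n ((p.count n : Int) + 1))
          (by simp)
          (by intro x
              rw [PySem.Dict.getD_insert]
              by_cases hx : x = n
              · subst hx; simp
              · have hnx : ¬ n = x := fun h => hx h.symm
                simp [hx, hgetD x, List.count_append, hnx])
          (by intro x
              rw [PySem.Dict.contains_insert, hcont]
              by_cases hx : x = n <;> simp [hx])
          (by intro x
              by_cases hx : x = n
              · subst hx; simp [List.count_append]; have := hle x; omega
              · have hnx : ¬ n = x := fun h => hx h.symm
                simpa [List.count_append, List.count_singleton, hnx] using hle x)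
        rw [this]
        congr 1
        simp
    · have hc : d.contains n = false := by rw [hcont]; simp [hmem]
      have hcnt0 : p.count n = 0 := List.count_eq_zero.mpr hmem
      have hcf : condT (p ++ n :: rest') p.length = false := by rw [hcond]; simp; omega
      simp only [encALoop, hc, Bool.false_eq_true, if_false, scanC, hcf]
      have := ih (p ++ [n]) (d.insert n 1)
        (by simp)
        (by intro x
            rw [PySem.Dict.getD_insert]
            by_cases hx : x = n
            · subst hx; simp [List.count_append, hcnt0]
            · have hnx : ¬ n = x := fun h => hx h.symm
              simp [hx, hgetD x, List.count_append, hnx])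
        (by intro x
            rw [PySem.Dict.contains_insert, hcont]
            by_cases hx : x = n <;> simp [hx])
        (by intro x
            by_cases hx : x = n
            · subst hx; simp [List.count_append, hcnt0]
            · have hnx : ¬ n = x := fun h => hx h.symm
              simpa [List.count_append, List.count_singleton, hnx] using hle x)
      rw [this]
      congr 1
      simp

lemma A_eq (l : List Int) :
    encontrar_repetido_3x l = scanC l (List.range l.length) := by
  rw [List.range_eq_range']
  exact encALoop_eq l l [] PySem.Dict.empty (by simp)
    (by intro x; simp [PySem.Dict.getD_empty])
    (by intro x; simp [PySem.Dict.contains_empty])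
    (by intro x; simp)

-- B's position list is the Nat-index list Pfin, cast to Int
lemma enum_filter_eq (v : Int) : ∀ (l : List Int) (s : Nat),
    ((PySem.List.enumerate l (s : Int)).filter (fun p => p.2 == v)).map (fun p => p.1)
      = ((List.range l.length).filter (fun i => l.getD i 0 == v)).map
          (fun i => ((s + i : Nat) : Int)) := by
  intro l
  induction l with
  | nil => intro s; simp [PySem.List.enumerate_nil]
  | cons x xs ih =>
    intro s
    have hstep : ((s : Int) + 1) = (((s + 1 : Nat)) : Int) := by push_cast; ring
    have hcomp : ((fun i => (x :: xs).getD i 0 == v) ∘ Nat.succ) = (fun i => xs.getD i 0 == v) := by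
      funext i; simp [Function.comp]
    rw [PySem.List.enumerate_cons, List.length_cons, List.range_succ_eq_map]
    rw [List.filter_cons, List.filter_cons, List.filter_map, hcomp]
    have htail :
        ((((List.range xs.length).filter (fun i => xs.getD i 0 == v)).map Nat.succ).map
            (fun i => ((s + i : Nat) : Int)))
          = ((List.range xs.length).filter (fun i => xs.getD i 0 == v)).map
              (fun i => (((s + 1) + i : Nat) : Int)) := by
      rw [List.map_map]
      apply List.map_congr_left
      intro i _
      show (((s + Nat.succ i : Nat)) : Int) = _
      congr 1
      omega
    by_cases hx : (x == v) = true
    · simp only [hx, List.getD_cons_zero, if_true, List.map_cons]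
      rw [hstep, ih (s + 1), htail]
      simp
    · have hx' : (x == v) = false := by simpa using hx
      simp only [hx', List.getD_cons_zero, Bool.false_eq_true, if_false]
      rw [hstep, ih (s + 1), htail]

lemma posOcorrencias_eq (l : List Int) (v : Int) :
    posOcorrencias l v = (Pfin l v).map (fun i : Nat => (i : Int)) := by
  unfold posOcorrencias Pfin
  have h := enum_filter_eq v l 0
  rw [show (((0 : Nat)) : Int) = (0 : Int) from rfl] at h
  rw [h]
  apply List.map_congr_left
  intro i _
  norm_num

lemma posOcorrencias_length (l : List Int) (v : Int) :
    (posOcorrencias l v).length = (Pfin l v).length := by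
  rw [posOcorrencias_eq]; simp

lemma posOcorrencias_getD2 (l : List Int) (v : Int) (h : 3 ≤ (Pfin l v).length) :
    (posOcorrencias l v).getD 2 0 = (((Pfin l v).getD 2 0 : Nat) : Int) := by
  rw [posOcorrencias_eq]
  have h2 : 2 < (Pfin l v).length := by omega
  rw [List.getD_eq_getElem _ _ (by simpa using h2), List.getD_eq_getElem _ _ h2,
    List.getElem_map]

lemma pairwise_Pfin (l : List Int) (v : Int) : (Pfin l v).Pairwise (· < ·) :=
  List.Pairwise.filter _ (List.pairwise_lt_range)

lemma mem_Pfin (l : List Int) (v : Int) (j : Nat) :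
    j ∈ Pfin l v ↔ j < l.length ∧ l.getD j 0 = v := by
  unfold Pfin
  simp [List.mem_filter, List.mem_range]

lemma pairwise_Cset (l : List Int) : (Cset l).Pairwise (· < ·) :=
  List.Pairwise.filter _ (List.pairwise_lt_range)

lemma mem_Cset (l : List Int) (j : Nat) :
    j ∈ Cset l ↔ j < l.length ∧ condT l j = true := by
  unfold Cset
  simp [List.mem_filter, List.mem_range]

-- decomposition of Pfin at index i < length
lemma Pfin_split (l : List Int) (v : Int) (i : Nat) (hi : i < l.length) :
    Pfin l v = (List.range (i+1)).filter (fun k => l.getD k 0 == v)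
      ++ ((List.range (l.length - (i+1))).map ((i+1) + ·)).filter (fun k => l.getD k 0 == v) := by
  unfold Pfin
  conv_lhs => rw [show l.length = (i+1) + (l.length - (i+1)) by omega]
  rw [List.range_add, List.filter_append]

-- the key characterisation: v's third occurrence is at i  ↔  i is a hit with value v
lemma third_iff (l : List Int) (v : Int) (i : Nat) :
    (3 ≤ (Pfin l v).length ∧ (Pfin l v).getD 2 0 = i)
      ↔ (i < l.length ∧ l.getD i 0 = v ∧ condT l i = true) := by
  constructor
  · rintro ⟨h3, hg⟩
    have h2 : 2 < (Pfin l v).length := by omega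
    have hmem : i ∈ Pfin l v := by
      rw [← hg, List.getD_eq_getElem _ _ h2]
      exact List.getElem_mem h2
    obtain ⟨hin, hiv⟩ := (mem_Pfin l v i).mp hmem
    refine ⟨hin, hiv, ?_⟩
    have hsplit := Pfin_split l v i hin
    set A₁ := (List.range (i+1)).filter (fun k => l.getD k 0 == v) with hA₁
    set A₂ := ((List.range (l.length - (i+1))).map ((i+1) + ·)).filter (fun k => l.getD k 0 == v) with hA₂
    have hgt : ∀ a ∈ A₂, i < a := by
      intro a ha
      have hm := (List.mem_filter.mp ha).1
      obtain ⟨x, _, hx⟩ := List.mem_map.mp hm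
      omega
    have hA1len : A₁.length = 3 := by
      rcases Nat.lt_or_ge A₁.length 3 with hlt | hge
      · -- impossible: P[2] would land in A₂ and be > i
        exfalso
        have hg' := hg
        rw [hsplit, List.getD_append_right A₁ A₂ 0 2 (by omega)] at hg'
        have hlen2 : 2 - A₁.length < A₂.length := by
          rw [hsplit, List.length_append] at h3; omega
        have : A₂.getD (2 - A₁.length) 0 ∈ A₂ := by
          rw [List.getD_eq_getElem _ _ hlen2]
          exact List.getElem_mem hlen2
        have := hgt _ this
        omega
      · rcases Nat.lt_or_ge A₁.length 4 with h4 | h4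
        · omega
        · -- impossible: P[3] would be in A₁ (≤ i) yet > P[2] = i
          exfalso
          have hlen4 : 3 < (Pfin l v).length := by
            rw [hsplit, List.length_append]; omega
          have hlt23 : (Pfin l v)[2]'h2 < (Pfin l v)[3]'hlen4 :=
            List.pairwise_iff_getElem.mp (pairwise_Pfin l v) 2 3 h2 hlen4 (by omega)
          have hP2 : (Pfin l v)[2]'h2 = i := by
            rw [← List.getD_eq_getElem _ 0 h2, hg]
          have hP3 : (Pfin l v)[3]'hlen4 = A₁.getD 3 0 := by
            rw [← List.getD_eq_getElem _ 0 hlen4, hsplit, List.getD_append A₁ A₂ 0 3 (by omega)]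
          have hmem3 : A₁.getD 3 0 ∈ A₁ := by
            rw [List.getD_eq_getElem _ _ (by omega)]
            exact List.getElem_mem (by omega)
          have hle3 : A₁.getD 3 0 ≤ i := by
            have hm := (List.mem_filter.mp hmem3).1
            have := List.mem_range.mp hm
            omega
          omega
    unfold condT
    rw [hiv, count_take_eq l v (i+1) (by omega), ← hA₁, hA1len]
    rfl
  · rintro ⟨hin, hiv, hc⟩
    have hsplit := Pfin_split l v i hin
    set A₁ := (List.range (i+1)).filter (fun k => l.getD k 0 == v) with hA₁
    have hcount : (l.take (i+1)).count v = 3 := by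
      unfold condT at hc
      rw [hiv] at hc
      simpa using hc
    have hA1len : A₁.length = 3 := by
      rw [hA₁, ← count_take_eq l v (i+1) (by omega)]
      exact hcount
    constructor
    · rw [hsplit, List.length_append]; omega
    · rw [hsplit, List.getD_append A₁ _ 0 2 (by omega)]
      have hiA : i ∈ A₁ :=
        List.mem_filter.mpr ⟨List.mem_range.mpr (by omega), by simpa [List.getD_eq_getElem?_getD] using hiv⟩
      have hleA : ∀ a ∈ A₁, a ≤ i := by
        intro a ha
        have := List.mem_range.mp (List.mem_filter.mp ha).1
        omega
      have hpair : A₁.Pairwise (· < ·) := List.Pairwise.filter _ (List.pairwise_lt_range)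
      obtain ⟨a, b, c, habc⟩ := List.length_eq_three.mp hA1len
      rw [habc] at hiA hpair
      have hab : a < b ∧ a < c ∧ b < c := by
        simp [List.pairwise_cons] at hpair
        tauto
      have hca := hleA a (by rw [habc]; simp)
      have hcb := hleA b (by rw [habc]; simp)
      have hcc := hleA c (by rw [habc]; simp)
      have : i = a ∨ i = b ∨ i = c := by simpa using hiA
      rw [habc]
      show c = i
      omega

-- encBStep, written out for each accumulator shape
lemma encBStep_none_eq (l : List Int) (v : Int) :
    encBStep l none v = if 3 ≤ (posOcorrencias l v).length
      then some ((posOcorrencias l v).getD 2 0, v) else none := rfl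

lemma encBStep_some_eq (l : List Int) (v : Int) (m : Int × Int) :
    encBStep l (some m) v = if 3 ≤ (posOcorrencias l v).length
      then (if (posOcorrencias l v).getD 2 0 < m.1
            then some ((posOcorrencias l v).getD 2 0, v) else some m)
      else some m := rfl

-- fold stays none when no value qualifies
lemma fold_none (l : List Int) : ∀ (vs : List Int),
    (∀ v ∈ vs, ¬ 3 ≤ (posOcorrencias l v).length) →
    vs.foldl (encBStep l) none = none := by
  intro vs
  induction vs with
  | nil => intro _; rfl
  | cons v vs ih =>
    intro h
    simp only [List.foldl_cons]
    rw [encBStep_none_eq, if_neg (h v (by simp))]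
    exact ih (fun w hw => h w (by simp [hw]))

-- fold keeps acc when no remaining value beats it
lemma fold_keep (l : List Int) : ∀ (vs : List Int) (m : Int × Int),
    (∀ v ∈ vs, 3 ≤ (posOcorrencias l v).length → ¬ ((posOcorrencias l v).getD 2 0 < m.1)) →
    vs.foldl (encBStep l) (some m) = some m := by
  intro vs
  induction vs with
  | nil => intro _ _; rfl
  | cons v vs ih =>
    intro m h
    simp only [List.foldl_cons]
    have hstep : encBStep l (some m) v = some m := by
      rw [encBStep_some_eq]
      by_cases hc : 3 ≤ (posOcorrencias l v).length
      · rw [if_pos hc, if_neg (h v (by simp) hc)]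
      · rw [if_neg hc]
    rw [hstep]
    exact ih m (fun w hw => h w (by simp [hw]))

-- fold returns the strict minimum
lemma fold_min (l : List Int) : ∀ (vs : List Int) (v₀ : Int) (acc : Option (Int × Int)),
    v₀ ∈ vs →
    3 ≤ (posOcorrencias l v₀).length →
    (∀ v ∈ vs, 3 ≤ (posOcorrencias l v).length →
      (posOcorrencias l v₀).getD 2 0 < (posOcorrencias l v).getD 2 0 ∨ v = v₀) →
    (acc = none ∨ ∃ m, acc = some m ∧ (posOcorrencias l v₀).getD 2 0 < m.1) →
    vs.foldl (encBStep l) acc = some ((posOcorrencias l v₀).getD 2 0, v₀) := by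
  intro vs
  induction vs with
  | nil => intro v₀ acc h; simp at h
  | cons v vs ih =>
    intro v₀ acc hmem hc hmin hacc
    simp only [List.foldl_cons]
    by_cases hv : v = v₀
    · subst hv
      have hstep : encBStep l acc v = some ((posOcorrencias l v).getD 2 0, v) := by
        rcases hacc with h | ⟨m, rfl, hm⟩
        · subst h; rw [encBStep_none_eq, if_pos hc]
        · rw [encBStep_some_eq, if_pos hc, if_pos hm]
      rw [hstep]
      exact fold_keep l vs _ (fun w hw hcw => by
        rcases hmin w (by simp [hw]) hcw with h | h
        · omega
        · subst h; omega)
    · rcases List.mem_cons.mp hmem with heq | hmem'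
      · exact absurd heq.symm hv
      have hacc' : encBStep l acc v = none ∨
          ∃ m, encBStep l acc v = some m ∧ (posOcorrencias l v₀).getD 2 0 < m.1 := by
        by_cases hcv : 3 ≤ (posOcorrencias l v).length
        · have hlt : (posOcorrencias l v₀).getD 2 0 < (posOcorrencias l v).getD 2 0 := by
            rcases hmin v (by simp) hcv with h | h
            · exact h
            · exact absurd h hv
          rcases hacc with h | ⟨m, rfl, hm⟩
          · subst h
            right
            exact ⟨_, by rw [encBStep_none_eq, if_pos hcv], hlt⟩
          · by_cases hb : (posOcorrencias l v).getD 2 0 < m.1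
            · right
              exact ⟨_, by rw [encBStep_some_eq, if_pos hcv, if_pos hb], hlt⟩
            · right
              exact ⟨m, by rw [encBStep_some_eq, if_pos hcv, if_neg hb], hm⟩
        · rcases hacc with h | ⟨m, rfl, hm⟩
          · subst h
            left
            rw [encBStep_none_eq, if_neg hcv]
          · right
            exact ⟨m, by rw [encBStep_some_eq, if_neg hcv], hm⟩
      exact ih v₀ _ hmem' hc (fun w hw => hmin w (by simp [hw])) hacc'

-- ===== VERDICT (by name: the statement is the Claim_ definition above) =====
theorem encontrar_repetido_3x_spec : Claim_equal_encontrar_repetido_3x := by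
  intro l _
  unfold Spec_encontrar_repetido_3x encontrar_repetido_3x_alt
  rw [A_eq, scanC_eq_filter]
  have hfil : (List.range l.length).filter (condT l) = Cset l := rfl
  rw [hfil]
  rcases hC : Cset l with _ | ⟨i₀, tl⟩
  · -- no hit: fold stays none
    rw [fold_none l _ (fun v hv hcand => ?_)]
    have h3 : 3 ≤ (Pfin l v).length := by rwa [posOcorrencias_length] at hcand
    have := (third_iff l v ((Pfin l v).getD 2 0)).mp ⟨h3, rfl⟩
    have : (Pfin l v).getD 2 0 ∈ Cset l := (mem_Cset l _).mpr ⟨this.1, this.2.2⟩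
    rw [hC] at this
    simp at this
  · -- first hit i₀: fold returns (i₀, l[i₀])
    have hi₀ : i₀ ∈ Cset l := by rw [hC]; simp
    obtain ⟨hi₀n, hcond₀⟩ := (mem_Cset l i₀).mp hi₀
    set v₀ := l.getD i₀ 0 with hv₀
    obtain ⟨h3, hg⟩ := (third_iff l v₀ i₀).mpr ⟨hi₀n, rfl, hcond₀⟩
    have hcand₀ : 3 ≤ (posOcorrencias l v₀).length := by rwa [posOcorrencias_length]
    have hget₀ : (posOcorrencias l v₀).getD 2 0 = (i₀ : Int) := by
      rw [posOcorrencias_getD2 l v₀ h3, hg]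
    have hmem : v₀ ∈ PySem.List.dedup l := by
      rw [PySem.List.mem_dedup]
      have : l[i₀] ∈ l := List.getElem_mem hi₀n
      rwa [hv₀, List.getD_eq_getElem l 0 hi₀n]
    have hmin : ∀ v ∈ PySem.List.dedup l, 3 ≤ (posOcorrencias l v).length →
        (posOcorrencias l v₀).getD 2 0 < (posOcorrencias l v).getD 2 0 ∨ v = v₀ := by
      intro v _ hcv
      have h3v : 3 ≤ (Pfin l v).length := by rwa [posOcorrencias_length] at hcv
      set j := (Pfin l v).getD 2 0 with hj
      obtain ⟨hjn, hjv, hjc⟩ := (third_iff l v j).mp ⟨h3v, rfl⟩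
      have hjC : j ∈ Cset l := (mem_Cset l j).mpr ⟨hjn, hjc⟩
      rw [hC] at hjC
      rcases List.mem_cons.mp hjC with h | h
      · right
        rw [← hjv, h]
      · left
        have := (List.pairwise_cons.mp (by rw [← hC]; exact pairwise_Cset l)).1 j h
        rw [hget₀, posOcorrencias_getD2 l v h3v, ← hj]
        exact_mod_cast this
    rw [fold_min l _ v₀ none hmem hcand₀ hmin (Or.inl rfl), hget₀]
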